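-- pv_equiv track=rewrite | github.com/min1018/Alogorithm | 프로그래머스/1/131128. 숫자 짝꿍/숫자 짝꿍.py | solution
-- ===== SOURCE A (Python) =====
-- from collections import Counter
--
-- def solution(X, Y):
--     xcnt = Counter(X)
--     ycnt = Counter(Y)
--
--     tmp = []
--     for xnum in xcnt:
--         if xnum in ycnt:
--             tmp.extend([xnum] * min(xcnt[xnum], ycnt[xnum]))
--
--     tmp.sort(reverse=True)
--
--     if len(tmp) == 0:
--         answer = '-1'
--     elif tmp[0] == '0':
--         answer = '0'
--     else:
--         answer = ''.join(tmp)
--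
--     return answer
-- ===== SOURCE B (Python) =====
-- def _tally(s):
--     cnt = [0] * 128
--     for ch in s:
--         cnt[ord(ch)] += 1
--     return cnt
--
-- def solution(X, Y):
--     # counting sort over the fixed ASCII alphabet: no Counter, no comparison sort
--     cx = _tally(X)
--     cy = _tally(Y)
--     parts = []
--     for code in range(127, -1, -1):
--         m = cx[code] if cx[code] < cy[code] else cy[code]
--         if m:
--             parts.append(chr(code) * m)
--     s = ''.join(parts)
--     if not s:
--         return '-1'
--     if s[0] == '0':
--         return '0'
--     return s
-- ===== Notes on version B (the rewrite author's own statement) =====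
-- stated objective: alternative
-- what changed: B replaces Counter dictionaries and the comparison sort entirely by a counting sort: two fixed 128-slot tally arrays indexed by character code and one descending scan over the codes emitting min-count blocks; asymptotically O(n) but CPython's C-level Counter/sort keep the measured gap below 1.5x, so no speed is claimed.
import Mathlib
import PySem

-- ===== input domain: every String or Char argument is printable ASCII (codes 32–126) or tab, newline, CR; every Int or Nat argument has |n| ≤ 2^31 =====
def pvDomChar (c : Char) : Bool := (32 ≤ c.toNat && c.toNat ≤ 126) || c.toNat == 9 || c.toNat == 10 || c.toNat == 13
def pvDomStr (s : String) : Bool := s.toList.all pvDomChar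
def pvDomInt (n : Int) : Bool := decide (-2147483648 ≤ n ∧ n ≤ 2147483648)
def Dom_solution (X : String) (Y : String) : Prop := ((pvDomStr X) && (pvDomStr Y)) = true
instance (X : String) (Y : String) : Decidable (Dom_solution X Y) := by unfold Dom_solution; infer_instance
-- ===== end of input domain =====

-- B replaces A's Counter dictionaries and comparison sort by a counting sort over the
-- fixed 128-slot ASCII code space with one descending scan (objective: alternative algorithm).

-- ===== PORT A =====
def solution (X : String) (Y : String) : String :=
  let xcnt := PySem.Dict.counter X.toList
  let ycnt := PySem.Dict.counter Y.toList
  let tmp : List Char := xcnt.keys.foldl (fun acc xnum =>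
      if ycnt.contains xnum then
        acc ++ PySem.List.pyRepeat [xnum] (min (xcnt.getD xnum 0) (ycnt.getD xnum 0))
      else acc) []
  let tmp2 := PySem.List.sorted tmp (fun c => c) true
  if tmp2.length = 0 then "-1"
  else if PySem.List.pyGetD tmp2 0 ' ' = '0' then "0"
  else String.ofList tmp2

-- ===== PORT B =====
-- helper = Source B's _tally: cnt = [0]*128; for ch in s: cnt[ord(ch)] += 1
def tally (s : List Char) : List Int :=
  s.foldl (fun cnt ch => cnt.set ch.toNat (cnt.getD ch.toNat 0 + 1)) (List.replicate 128 0)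

def solution_alt (X : String) (Y : String) : String :=
  let cx := tally X.toList
  let cy := tally Y.toList
  let parts := (PySem.List.pyRange 127 (-1) (-1)).foldl (fun acc code =>
      let m := if cx.getD code.toNat 0 < cy.getD code.toNat 0 then cx.getD code.toNat 0
               else cy.getD code.toNat 0
      if m ≠ 0 then acc ++ [List.replicate m.toNat (Char.ofNat code.toNat)] else acc) []
  let s := parts.flatten
  if s = [] then "-1"
  else if PySem.List.pyGetD s 0 ' ' = '0' then "0"
  else String.ofList s

-- ===== PRECONDITION & SPEC =====
def Spec_solution (X : String) (Y : String) (out : String) : Prop := out = solution_alt X Y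
instance (X : String) (Y : String) (out : String) : Decidable (Spec_solution X Y out) := by unfold Spec_solution; infer_instance

-- ===== CLAIM (what is proved, stated in full; the proofs are below) =====
def Claim_equal_solution : Prop := ∀ (X : String) (Y : String), Dom_solution X Y → Spec_solution X Y (solution X Y)

-- ===== LEMMAS AND PROOFS =====

-- the per-character multiplicity both programs emit: min of the two multiplicities
def pvN (X Y : String) (c : Char) : Nat :=
  (min ((PySem.Dict.counter X.toList).getD c 0) ((PySem.Dict.counter Y.toList).getD c 0)).toNat

-- the 128 ASCII characters in descending code order
def pvLdesc : List Char := (List.range 128).map (fun j => Char.ofNat (127 - j))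

-- the canonical result list both sides are reduced to
def pvCanon (X Y : String) : List Char :=
  pvLdesc.flatMap (fun c => List.replicate (pvN X Y c) c)

-- the distinct shared characters, as A enumerates them
def pvK (X Y : String) : List Char :=
  (PySem.Dict.counter X.toList).keys.filter (fun c => (PySem.Dict.counter Y.toList).contains c)

lemma pv_pvN_eq (X Y : String) (c : Char) :
    pvN X Y c = min (X.toList.count c) (Y.toList.count c) := by
  simp [pvN, PySem.Dict.getD_counter]
  omega

lemma pv_toNat_ofNat (k : Nat) (hk : k < 128) : (Char.ofNat k).toNat = k := by
  have hv : Nat.isValidChar k := Or.inl (by omega)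
  simp [Char.ofNat, Char.ofNatAux, dif_pos hv, Char.toNat]

lemma pv_char_eq_iff (c : Char) (k : Nat) (hk : k < 128) : c.toNat = k ↔ c = Char.ofNat k := by
  constructor
  · intro h; rw [← h, Char.ofNat_toNat]
  · intro h; rw [h, pv_toNat_ofNat k hk]

lemma pv_ldesc_pairwise : pvLdesc.Pairwise (fun a b => b < a) := by
  unfold pvLdesc
  rw [List.pairwise_iff_getElem]
  intro i j hi hj hij
  simp only [List.length_map, List.length_range] at hi hj
  simp only [List.getElem_map, List.getElem_range]
  apply Char.lt_def.mpr
  show (Char.ofNat (127 - j)).toNat < (Char.ofNat (127 - i)).toNat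
  rw [pv_toNat_ofNat _ (by omega), pv_toNat_ofNat _ (by omega)]
  omega

lemma pv_ldesc_nodup : pvLdesc.Nodup :=
  pv_ldesc_pairwise.imp (fun h => ne_of_gt h)

lemma pv_mem_ldesc (c : Char) (h : c.toNat < 128) : c ∈ pvLdesc := by
  refine List.mem_map.mpr ⟨127 - c.toNat, List.mem_range.mpr (by omega), ?_⟩
  have h2 : 127 - (127 - c.toNat) = c.toNat := by omega
  rw [h2, Char.ofNat_toNat]

lemma pv_mem_K (X Y : String) (c : Char) :
    c ∈ pvK X Y ↔ c ∈ X.toList ∧ c ∈ Y.toList := by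
  simp [pvK, List.mem_filter, PySem.Dict.keys_counter, PySem.Set.mem_ofList,
    PySem.Dict.contains_counter]

lemma pv_K_nodup (X Y : String) : (pvK X Y).Nodup :=
  (PySem.Dict.nodup_keys_counter X.toList).filter _

lemma pv_pvN_zero (X Y : String) (c : Char) (h : c ∉ pvK X Y) : pvN X Y c = 0 := by
  rw [pv_pvN_eq]
  rcases (not_and_or.mp ((pv_mem_K X Y c).not.mp h)) with h1 | h1 <;>
    simp [List.count_eq_zero_of_not_mem h1]

-- dropping elements whose block is empty does not change the concatenation
lemma pv_flatMap_filter {α : Type} (l : List α) (p : α → Bool) (f : α → List Char)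
    (h : ∀ c ∈ l, p c = false → f c = []) :
    (l.filter p).flatMap f = l.flatMap f := by
  induction l with
  | nil => rfl
  | cons x t ih =>
    have ht : ∀ c ∈ t, p c = false → f c = [] := fun c hc => h c (List.mem_cons_of_mem _ hc)
    by_cases hx : p x = true
    · simp [hx, ih ht]
    · have hx' : p x = false := by simpa using hx
      simp [hx', ih ht, h x (List.mem_cons_self) hx']

-- blocks of repeated characters over strictly descending keys are (non-strictly) descending
lemma pv_pairwise_ge_flatMap_replicate (n : Char → Nat) :
    ∀ (ks : List Char), ks.Pairwise (fun a b => b < a) →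
    (ks.flatMap (fun c => List.replicate (n c) c)).Pairwise (fun a b : Char => b ≤ a) := by
  intro ks h
  induction ks with
  | nil => simp
  | cons c t ih =>
    rcases List.pairwise_cons.mp h with ⟨hc, ht⟩
    simp only [List.flatMap_cons]
    rw [List.pairwise_append]
    refine ⟨?_, ih ht, ?_⟩
    · exact List.pairwise_replicate.mpr (Or.inr le_rfl)
    · intro a ha b hb
      rcases List.mem_flatMap.mp hb with ⟨d, hd, hbd⟩
      rw [List.eq_of_mem_replicate ha, List.eq_of_mem_replicate hbd]
      exact le_of_lt (hc d hd)

-- a strictly descending rearrangement of the shared-character blocks IS the reverse-sorted multiset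
lemma pv_sorted_flatMap_replicate (K : List Char) (hnd : K.Nodup) (n : Char → Nat) :
    PySem.List.sorted (K.flatMap (fun c => List.replicate (n c) c)) (fun c => c) true
      = (PySem.List.sorted K (fun c => c) true).flatMap (fun c => List.replicate (n c) c) := by
  have hperm : (PySem.List.sorted K (fun c => c) true).Pairwise (fun a b : Char => b < a) := by
    have h1 := PySem.List.sorted_pairwise_rev K (fun c => c)
    have h2 : (PySem.List.sorted K (fun c => c) true).Nodup :=
      (PySem.List.sorted_perm K (fun c => c) true).nodup_iff.mpr hnd
    exact (h1.and h2).imp (fun h => lt_of_le_of_ne h.1 (fun he => h.2 he.symm))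
  apply List.Perm.eq_of_pairwise (le := fun a b : Char => b ≤ a)
  · intro a b _ _ h1 h2; exact le_antisymm h2 h1
  · exact PySem.List.sorted_pairwise_rev _ (fun c => c)
  · exact pv_pairwise_ge_flatMap_replicate n _ hperm
  · exact (PySem.List.sorted_perm _ _ _).trans
      ((PySem.List.sorted_perm K (fun c => c) true).flatMap (fun a _ => List.Perm.refl _)).symm

-- A's reverse-sorted distinct shared characters = the descending ASCII scan restricted to them
lemma pv_sorted_K (X Y : String) (hd : Dom_solution X Y) :
    PySem.List.sorted (pvK X Y) (fun c => c) true
      = pvLdesc.filter (fun c => decide (c ∈ pvK X Y)) := by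
  have hdX : pvDomStr X = true := by
    unfold Dom_solution at hd
    exact (Bool.and_eq_true _ _ |>.mp hd).1
  apply PySem.List.sorted_rev_eq_of_perm_of_pairwise_gt
  · apply (List.perm_ext_iff_of_nodup (pv_ldesc_nodup.filter _) (pv_K_nodup X Y)).mpr
    intro c
    simp only [List.mem_filter, decide_eq_true_eq]
    constructor
    · rintro ⟨-, h⟩; exact h
    · intro h
      refine ⟨pv_mem_ldesc c ?_, h⟩
      have hx : c ∈ X.toList := ((pv_mem_K X Y c).mp h).1
      have hdom : pvDomChar c = true := List.all_eq_true.mp hdX c hx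
      simp [pvDomChar] at hdom
      omega
  · exact List.Pairwise.sublist List.filter_sublist pv_ldesc_pairwise

-- reading one cell of a set
lemma pv_getD_set (l : List Int) (i j : Nat) (v : Int) :
    (l.set i v).getD j 0 = if i = j ∧ i < l.length then v else l.getD j 0 := by
  by_cases hij : i = j
  · subst hij
    by_cases hl : i < l.length
    · simp [List.getD, hl]
    · have h1 : l[i]? = none := List.getElem?_eq_none (by omega)
      simp [List.getD, hl]
  · simp [List.getD, hij]

lemma pv_foldl_getD (s : List Char) : ∀ (l : List Int) (k : Nat), k < l.length →
    (s.foldl (fun cnt ch => cnt.set ch.toNat (cnt.getD ch.toNat 0 + 1)) l).getD k 0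
      = l.getD k 0 + (s.countP (fun c => c.toNat == k) : Int) := by
  induction s with
  | nil => intro l k hk; simp
  | cons c t ih =>
    intro l k hk
    rw [List.foldl_cons, ih _ k (by simpa using hk), pv_getD_set]
    by_cases h : c.toNat = k
    · subst h
      have hcond : c.toNat = c.toNat ∧ c.toNat < l.length := ⟨rfl, hk⟩
      rw [if_pos hcond]
      simp
      omega
    · have hb : (c.toNat == k) = false := by simp [h]
      simp [h, hb]

lemma pv_countP_eq_count (s : List Char) (k : Nat) (hk : k < 128) :
    s.countP (fun c => c.toNat == k) = s.count (Char.ofNat k) := by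
  induction s with
  | nil => rfl
  | cons c t ih =>
    by_cases h : c = Char.ofNat k
    · subst h
      simp [ih, pv_toNat_ofNat k hk]
    · have h2 : (c.toNat == k) = false := by
        simp only [beq_eq_false_iff_ne, ne_eq]
        intro hh; exact h ((pv_char_eq_iff c k hk).mp hh)
      simp [ih, h, h2]

-- the tally array reads back the character count
lemma pv_tally_getD (s : List Char) (k : Nat) (hk : k < 128) :
    (tally s).getD k 0 = (s.count (Char.ofNat k) : Int) := by
  unfold tally
  rw [pv_foldl_getD s _ k (by simpa using hk), List.getD_replicate _ hk,
    pv_countP_eq_count s k hk]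
  ring

-- B's min expression is the canonical multiplicity
lemma pv_m_eq (X Y : String) (k : Nat) (hk : k < 128) :
    (if (tally X.toList).getD k 0 < (tally Y.toList).getD k 0 then (tally X.toList).getD k 0
     else (tally Y.toList).getD k 0).toNat = pvN X Y (Char.ofNat k) := by
  rw [pv_tally_getD X.toList k hk, pv_tally_getD Y.toList k hk, pv_pvN_eq]
  split_ifs with h <;> omega

-- the guarded append-then-flatten loop is a flatMap
lemma pv_flatten_parts {α : Type} (l : List α) (p : α → Prop) [DecidablePred p]
    (f : α → List Char) (h : ∀ x ∈ l, ¬ p x → f x = []) :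
    (l.foldl (fun acc x => if p x then acc ++ [f x] else acc) ([] : List (List Char))).flatten
      = l.flatMap f := by
  suffices haux : ∀ acc : List (List Char),
      (l.foldl (fun acc x => if p x then acc ++ [f x] else acc) acc).flatten
        = acc.flatten ++ l.flatMap f by simpa using haux []
  induction l with
  | nil => intro acc; simp
  | cons x t ih =>
    have ht : ∀ c ∈ t, ¬ p c → f c = [] := fun c hc => h c (List.mem_cons_of_mem _ hc)
    intro acc
    rw [List.foldl_cons]
    by_cases hx : p x
    · rw [if_pos hx, ih ht]
      simp
    · rw [if_neg hx, ih ht, List.flatMap_cons, h x (List.mem_cons_self) hx]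
      simp

-- A's result list equals the canonical list
lemma pv_A_list (X Y : String) (hd : Dom_solution X Y) :
    PySem.List.sorted
      ((PySem.Dict.counter X.toList).keys.foldl (fun acc xnum =>
        if (PySem.Dict.counter Y.toList).contains xnum then
          acc ++ PySem.List.pyRepeat [xnum]
            (min ((PySem.Dict.counter X.toList).getD xnum 0) ((PySem.Dict.counter Y.toList).getD xnum 0))
        else acc) []) (fun c => c) true = pvCanon X Y := by
  simp only [PySem.List.foldl_if_eq_foldl_filter, PySem.List.foldl_append_eq_flatMap,
    PySem.List.pyRepeat_singleton, List.nil_append]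
  have hK : ((PySem.Dict.counter X.toList).keys.filter
      (fun xnum => (PySem.Dict.counter Y.toList).contains xnum)) = pvK X Y := rfl
  rw [hK, pv_sorted_flatMap_replicate _ (pv_K_nodup X Y), pv_sorted_K X Y hd,
    pv_flatMap_filter _ _ _ (fun c _ hc => by
      have hnk : c ∉ pvK X Y := by simpa using hc
      show List.replicate (pvN X Y c) c = []
      rw [pv_pvN_zero X Y c hnk]
      rfl)]
  rfl

-- B's result list equals the canonical list
lemma pv_B_list (X Y : String) :
    ((PySem.List.pyRange 127 (-1) (-1)).foldl (fun acc code =>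
      let m := if (tally X.toList).getD code.toNat 0 < (tally Y.toList).getD code.toNat 0
               then (tally X.toList).getD code.toNat 0 else (tally Y.toList).getD code.toNat 0
      if m ≠ 0 then acc ++ [List.replicate m.toNat (Char.ofNat code.toNat)] else acc) []).flatten
    = pvCanon X Y := by
  rw [pv_flatten_parts (PySem.List.pyRange 127 (-1) (-1))
      (fun code => (if (tally X.toList).getD code.toNat 0 < (tally Y.toList).getD code.toNat 0
               then (tally X.toList).getD code.toNat 0 else (tally Y.toList).getD code.toNat 0) ≠ 0)
      (fun code => List.replicate (if (tally X.toList).getD code.toNat 0 < (tally Y.toList).getD code.toNat 0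
               then (tally X.toList).getD code.toNat 0 else (tally Y.toList).getD code.toNat 0).toNat
               (Char.ofNat code.toNat))
      (fun x _ hx => by
        have h0 : (if (tally X.toList).getD x.toNat 0 < (tally Y.toList).getD x.toNat 0
               then (tally X.toList).getD x.toNat 0 else (tally Y.toList).getD x.toNat 0) = 0 := by
          by_contra hne; exact hx hne
        show List.replicate (if (tally X.toList).getD x.toNat 0 < (tally Y.toList).getD x.toNat 0
               then (tally X.toList).getD x.toNat 0 else (tally Y.toList).getD x.toNat 0).toNat
               (Char.ofNat x.toNat) = []
        rw [h0]
        rfl)]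
  rw [PySem.List.pyRange_neg_one,
    show ((127:Int) - (-1)).toNat = 128 from by decide, List.flatMap_map]
  unfold pvCanon pvLdesc
  rw [List.flatMap_map, List.flatMap_def, List.flatMap_def]
  apply congrArg List.flatten
  apply List.map_congr_left
  intro k hk
  have hk128 : k < 128 := List.mem_range.mp hk
  have ht : ((127:Int) - (k:Int)).toNat = 127 - k := by omega
  simp only [ht]
  rw [pv_m_eq X Y (127 - k) (by omega)]

-- ===== VERDICT (by name: the statement is the Claim_ definition above) =====
theorem solution_spec : Claim_equal_solution := by
  intro X Y hd
  unfold Spec_solution solution solution_alt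
  simp only [pv_A_list X Y hd, pv_B_list X Y, List.length_eq_zero_iff]
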